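-- pv_equiv track=rewrite | github.com/hellowonder/pdftranslate | src/translate/llm_util.py | has_low_diversity_or_repetition
-- ===== SOURCE A (Python) =====
-- from collections import Counter
--
-- def has_low_diversity_or_repetition(text: str) -> bool:
--     tokens = (text or "").split()
--     if len(tokens) >= 20:
--         unique_ratio = len(set(tokens)) / len(tokens)
--         if unique_ratio < 0.1:
--             return True
--
--     if len(tokens) < 6:
--         return False
--
--     n = 6
--     ngrams = [" ".join(tokens[i:i + n]) for i in range(len(tokens) - n + 1)]
--     counter = Counter(ngrams)
--     return any(count > 10 for count in counter.values())
-- ===== SOURCE B (Python) =====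
-- def has_low_diversity_or_repetition(text: str) -> bool:
--     tokens = (text or "").split()
--     if len(tokens) >= 20 and 10 * len(set(tokens)) < len(tokens):
--         return True
--     if len(tokens) < 6:
--         return False
--     grams = sorted(" ".join(tokens[i:i + 6]) for i in range(len(tokens) - 5))
--     run = 1
--     for prev, cur in zip(grams, grams[1:]):
--         if cur == prev:
--             run += 1
--             if run > 10:
--                 return True
--         else:
--             run = 1
--     return False
-- ===== Notes on version B (the rewrite author's own statement) =====
-- stated objective: alternative
-- what changed: The Counter hash table over 6-grams is replaced by sorting the 6-gram list and scanning once for a run of more than 10 identical consecutive n-grams; the unique-ratio float division is replaced by the exact integer comparison 10*unique < total.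
import Mathlib
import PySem

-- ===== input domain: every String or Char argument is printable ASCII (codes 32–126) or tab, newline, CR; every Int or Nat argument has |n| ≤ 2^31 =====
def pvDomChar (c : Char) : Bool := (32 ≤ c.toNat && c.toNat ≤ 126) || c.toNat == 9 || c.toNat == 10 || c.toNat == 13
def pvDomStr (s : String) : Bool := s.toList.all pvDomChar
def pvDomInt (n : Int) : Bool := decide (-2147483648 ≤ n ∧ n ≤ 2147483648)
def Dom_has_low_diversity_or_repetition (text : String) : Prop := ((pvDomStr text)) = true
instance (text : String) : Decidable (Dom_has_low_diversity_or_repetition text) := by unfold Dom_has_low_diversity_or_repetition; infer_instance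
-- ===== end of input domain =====

-- B replaces the Counter over 6-grams by sort-then-run-length scan (alternative decomposition, same results).
-- In both ports the float test `len(set(tokens))/len(tokens) < 0.1` is ported as the integer comparison
-- 10*|set| < |tokens|, which is exact for every token count below 7*10^15 (hence for every real string).

-- ===== PORT A =====
-- shared by both ports: the identical 6-gram comprehension [" ".join(tokens[i:i+6]) for i in range(len(tokens)-6+1)]
def pvNgrams (tokens : List String) : List String :=
  (PySem.List.pyRange 0 ((tokens.length : Int) - 6 + 1) 1).map
    (fun i => PySem.Str.join " " (PySem.List.slice tokens (some i) (some (i + 6))))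

def has_low_diversity_or_repetition (text : String) : Bool :=
  let tokens := PySem.Str.split₀ text
  if 20 ≤ tokens.length && decide (10 * PySem.Set.len (PySem.Set.ofList tokens) < tokens.length) then
    true
  else if tokens.length < 6 then
    false
  else
    let ngrams := pvNgrams tokens
    (PySem.Dict.counter ngrams).values.any (fun count => decide ((10 : Int) < count))

-- ===== PORT B =====
-- the run-length scan over consecutive pairs of the sorted 6-gram list (zip(grams, grams[1:]))
def pvRunScan : List String → String → Nat → Bool
  | [], _, _ => false
  | cur :: rest, prev, run =>
      if cur == prev then
        if 10 < run + 1 then true else pvRunScan rest cur (run + 1)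
      else
        pvRunScan rest cur 1

def has_low_diversity_or_repetition_alt (text : String) : Bool :=
  let tokens := PySem.Str.split₀ text
  if 20 ≤ tokens.length && decide (10 * PySem.Set.len (PySem.Set.ofList tokens) < tokens.length) then
    true
  else if tokens.length < 6 then
    false
  else
    match PySem.List.sorted (pvNgrams tokens) (fun x => x) false with
    | [] => false
    | g :: rest => pvRunScan rest g 1

-- ===== PRECONDITION & SPEC =====
def Spec_has_low_diversity_or_repetition (text : String) (out : Bool) : Prop := out = has_low_diversity_or_repetition_alt text
instance (text : String) (out : Bool) : Decidable (Spec_has_low_diversity_or_repetition text out) := by unfold Spec_has_low_diversity_or_repetition; infer_instance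

-- ===== CLAIM (what is proved, stated in full; the proofs are below) =====
def Claim_equal_has_low_diversity_or_repetition : Prop := ∀ (text : String), Dom_has_low_diversity_or_repetition text → Spec_has_low_diversity_or_repetition text (has_low_diversity_or_repetition text)

-- ===== LEMMAS AND PROOFS =====

-- the run-length scan on a sorted suffix detects exactly "some element occurs more than 10 times"
theorem pvRunScan_iff (rest : List String) (prev : String) (run : Nat)
    (hs : rest.Pairwise (· ≤ ·)) (hle : ∀ x ∈ rest, prev ≤ x)
    (h1 : 1 ≤ run) (h10 : run ≤ 10) :
    (pvRunScan rest prev run = true ↔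
      10 < run + rest.count prev ∨ ∃ x ∈ rest, 10 < rest.count x) := by
  induction rest generalizing prev run with
  | nil => simp [pvRunScan]; omega
  | cons c t ih =>
    rcases List.pairwise_cons.mp hs with ⟨hct, hst⟩
    by_cases hcp : c = prev
    · subst hcp
      rw [pvRunScan]
      simp only [beq_self_eq_true, if_true]
      by_cases hbig : 10 < run + 1
      · simp only [hbig]
        constructor
        · intro _
          left
          have : t.count c + 1 = (c :: t).count c := by simp
          omega
        · intro _; rfl
      · rw [if_neg hbig]
        rw [ih c (run + 1) hst hct (by omega) (by omega)]
        constructor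
        · rintro (h | ⟨x, hx, hcx⟩)
          · left; simp; omega
          · by_cases hxc : x = c
            · subst hxc; left; simp; omega
            · right; exact ⟨x, List.mem_cons_of_mem _ hx, by
                simpa [List.count_cons, Ne.symm hxc] using hcx⟩
        · rintro (h | ⟨x, hx, hcx⟩)
          · left; simp at h; omega
          · rcases List.mem_cons.mp hx with hxc | hxt
            · subst hxc
              left
              have : (x :: t).count x = t.count x + 1 := by simp
              omega
            · by_cases hxc : x = c
              · subst hxc; left
                have : (x :: t).count x = t.count x + 1 := by simp
                have hc : t.count x ≤ (x :: t).count x := by simp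
                omega
              · right
                exact ⟨x, hxt, by
                  have : (c :: t).count x = t.count x := by simp [Ne.symm hxc]
                  omega⟩
    · rw [pvRunScan]
      have hne : (c == prev) = false := by simp [hcp]
      rw [hne]
      simp only [Bool.false_eq_true, if_false]
      rw [ih c 1 hst hct (by omega) (by omega)]
      have hpc : prev ≤ c := hle c (List.mem_cons_self ..)
      have hpnot : prev ∉ c :: t := by
        intro hmem
        rcases List.mem_cons.mp hmem with h | h
        · exact hcp h.symm
        · have h1 := hct prev h
          have : prev = c := le_antisymm hpc h1
          exact hcp this.symm
      have hcount0 : (c :: t).count prev = 0 := List.count_eq_zero.mpr hpnot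
      constructor
      · rintro (h | ⟨x, hx, hcx⟩)
        · right
          refine ⟨c, List.mem_cons_self .., ?_⟩
          simp; omega
        · by_cases hxc : x = c
          · subst hxc; right
            exact ⟨x, List.mem_cons_self .., by simp; omega⟩
          · right
            exact ⟨x, List.mem_cons_of_mem _ hx, by simp [Ne.symm hxc]; omega⟩
      · rintro (h | ⟨x, hx, hcx⟩)
        · omega
        · rcases List.mem_cons.mp hx with hxc | hxt
          · subst hxc
            left
            simp at hcx
            omega
          · by_cases hxc : x = c
            · subst hxc; left
              simp at hcx
              omega
            · right
              refine ⟨x, hxt, ?_⟩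
              simp [Ne.symm hxc] at hcx
              omega

-- B's branch equals "some 6-gram occurs more than 10 times in the 6-gram list"
theorem alt_branch_iff (l : List String) :
    ((match PySem.List.sorted l (fun x => x) false with
      | [] => false
      | g :: rest => pvRunScan rest g 1) = true) ↔ ∃ x ∈ l, 10 < l.count x := by
  have hperm : (PySem.List.sorted l (fun x => x) false).Perm l := PySem.List.sorted_perm ..
  cases hmatch : PySem.List.sorted l (fun x => x) false with
  | nil =>
    have : l = [] := by
      have := hperm; rw [hmatch] at this
      exact (List.Perm.nil_eq this).symm
    subst this
    simp
  | cons g rest =>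
    have hsorted : (g :: rest).Pairwise (· ≤ ·) := by
      have := PySem.List.sorted_pairwise l (fun x => x) (κ := String)
      rw [hmatch] at this
      simpa using this
    rcases List.pairwise_cons.mp hsorted with ⟨hgr, hrest⟩
    rw [pvRunScan_iff rest g 1 hrest hgr (le_refl 1) (by omega)]
    have hperm' : (g :: rest).Perm l := by rw [← hmatch]; exact hperm
    constructor
    · rintro (h | ⟨x, hx, hcx⟩)
      · refine ⟨g, hperm'.mem_iff.mp (List.mem_cons_self ..), ?_⟩
        rw [← hperm'.count_eq]
        simp; omega
      · refine ⟨x, hperm'.mem_iff.mp (List.mem_cons_of_mem _ hx), ?_⟩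
        rw [← hperm'.count_eq]
        by_cases hxg : x = g
        · subst hxg; simp; omega
        · simp [Ne.symm hxg]; omega
    · rintro ⟨x, hx, hcx⟩
      have hxmem : x ∈ g :: rest := hperm'.mem_iff.mpr hx
      have hcnt : (g :: rest).count x = l.count x := hperm'.count_eq x
      by_cases hxg : x = g
      · subst hxg; left
        simp at hcnt
        omega
      · right
        refine ⟨x, ?_, ?_⟩
        · rcases List.mem_cons.mp hxmem with h | h
          · exact absurd h hxg
          · exact h
        · simp [Ne.symm hxg] at hcnt
          omega

-- A's branch equals the same existential, via Counter(ngrams).values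
theorem a_branch_iff (l : List String) :
    ((PySem.Dict.counter l).values.any (fun count => decide ((10 : Int) < count)) = true) ↔
      ∃ x ∈ l, 10 < l.count x := by
  have hvals : (PySem.Dict.counter l).values
      = ((PySem.Set.ofList l).map (fun k => (k, (l.count k : Int)))).map Prod.snd := by
    have := PySem.Dict.items_counter (xs := l)
    simp only [PySem.Dict.values, this]
  rw [hvals]
  simp only [List.map_map, List.any_eq_true, List.mem_map, Function.comp]
  constructor
  · rintro ⟨c, ⟨k, hk, rfl⟩, hc⟩
    refine ⟨k, (PySem.Set.mem_ofList ..).mp hk, ?_⟩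
    exact_mod_cast of_decide_eq_true hc
  · rintro ⟨x, hx, hcx⟩
    refine ⟨(l.count x : Int), ⟨x, (PySem.Set.mem_ofList ..).mpr hx, rfl⟩, ?_⟩
    exact decide_eq_true (by exact_mod_cast hcx)

-- ===== VERDICT (by name: the statement is the Claim_ definition above) =====
theorem has_low_diversity_or_repetition_spec : Claim_equal_has_low_diversity_or_repetition := by
  intro text _
  unfold Spec_has_low_diversity_or_repetition
  unfold has_low_diversity_or_repetition has_low_diversity_or_repetition_alt
  set tokens := PySem.Str.split₀ text with htok
  by_cases h1 : (20 ≤ tokens.length && decide (10 * PySem.Set.len (PySem.Set.ofList tokens) < tokens.length)) = true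
  · simp only [h1, if_true]
  · simp only [h1, Bool.false_eq_true, if_false]
    by_cases h2 : tokens.length < 6
    · simp only [h2, if_true]
    · simp only [h2, if_false]
      exact Bool.eq_iff_iff.mpr
        ((a_branch_iff (pvNgrams tokens)).trans (alt_branch_iff (pvNgrams tokens)).symm)
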